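-- pv_equiv track=rewrite | github.com/jameshc2001/aoc24 | src/days/day21.py | is_valid_permutation
-- ===== SOURCE A (Python) =====
-- def is_valid_permutation(permutation, positions, start, end):
--     x, y = start
--     for move in permutation:
--         if (move == '>'): x += 1
--         elif (move == 'v'): y += 1
--         elif (move == '<'): x -= 1
--         elif (move == '^'): y -= 1
--         if ((x, y) not in positions): return False
--     return (x, y) == end
-- ===== SOURCE B (Python) =====
-- from collections import Counter
--
-- _DELTAS = {'>': (1, 0), 'v': (0, 1), '<': (-1, 0), '^': (0, -1)}
--
-- def is_valid_permutation(permutation, positions, start, end):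
--     # Closed form for the endpoint from character counts, then a backward
--     # walk from it, undoing moves, with set membership for the visited points.
--     counts = Counter(permutation)
--     pos_set = set(positions)
--     final = (start[0] + counts['>'] - counts['<'],
--              start[1] + counts['v'] - counts['^'])
--     p = final
--     for move in reversed(permutation):
--         if p not in pos_set:
--             return False
--         dx, dy = _DELTAS.get(move, (0, 0))
--         p = (p[0] - dx, p[1] - dy)
--     return final == end
-- ===== Notes on version B (the rewrite author's own statement) =====
-- stated objective: alternative
-- what changed: B computes the endpoint in closed form from a Counter of the move characters and then validates by walking BACKWARD from that endpoint, undoing each move against a hash set of positions, instead of A's forward simulate-and-check loop.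
import Mathlib
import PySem

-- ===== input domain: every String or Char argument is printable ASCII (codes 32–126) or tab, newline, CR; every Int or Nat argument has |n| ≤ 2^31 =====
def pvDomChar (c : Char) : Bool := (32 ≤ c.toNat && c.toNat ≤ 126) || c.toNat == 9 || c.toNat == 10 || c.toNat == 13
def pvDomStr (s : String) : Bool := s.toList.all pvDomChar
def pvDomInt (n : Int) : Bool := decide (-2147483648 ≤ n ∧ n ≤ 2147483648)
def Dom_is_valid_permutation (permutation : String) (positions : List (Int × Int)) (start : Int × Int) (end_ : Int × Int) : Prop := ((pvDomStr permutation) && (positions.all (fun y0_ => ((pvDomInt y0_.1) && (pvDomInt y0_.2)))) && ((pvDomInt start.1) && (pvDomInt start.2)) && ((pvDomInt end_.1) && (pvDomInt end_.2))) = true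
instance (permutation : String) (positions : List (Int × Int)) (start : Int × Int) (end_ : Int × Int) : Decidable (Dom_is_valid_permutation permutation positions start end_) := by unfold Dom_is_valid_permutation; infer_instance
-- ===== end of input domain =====

-- B replaces A's forward simulate-and-check loop by a counted closed form for the
-- endpoint plus a backward walk from it that undoes moves against a set; return values agree.

-- ===== PORT A =====
-- A's loop: update (x, y) by the if/elif chain, return False as soon as the
-- current position is not in positions; at the end compare with end_.
def pvALoop (moves : List Char) (positions : List (Int × Int)) (xy : Int × Int) (end_ : Int × Int) : Bool :=
  match moves with
  | [] => xy == end_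
  | move :: rest =>
    let xy' :=
      if move == '>' then (xy.1 + 1, xy.2)
      else if move == 'v' then (xy.1, xy.2 + 1)
      else if move == '<' then (xy.1 - 1, xy.2)
      else if move == '^' then (xy.1, xy.2 - 1)
      else xy
    if positions.contains xy' then pvALoop rest positions xy' end_ else false

def is_valid_permutation (permutation : String) (positions : List (Int × Int)) (start : Int × Int) (end_ : Int × Int) : Bool :=
  pvALoop permutation.toList positions start end_

-- ===== PORT B =====
-- delta dict with default (0,0) for unrecognised move characters
def pvDeltas : PySem.Dict Char (Int × Int) :=
  PySem.Dict.mk [('>', ((1 : Int), (0 : Int))), ('v', (0, 1)), ('<', (-1, 0)), ('^', (0, -1))]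

-- the backward walk: check the current point, then undo the move
def pvBLoop (posset : PySem.Set (Int × Int)) (moves : List Char) (p : Int × Int) : Bool :=
  match moves with
  | [] => true
  | m :: rest =>
    if PySem.Set.contains posset p then
      let d := PySem.Dict.getD pvDeltas m (0, 0)
      pvBLoop posset rest (p.1 - d.1, p.2 - d.2)
    else false

def is_valid_permutation_alt (permutation : String) (positions : List (Int × Int)) (start : Int × Int) (end_ : Int × Int) : Bool :=
  let counts := PySem.Dict.counter permutation.toList
  let posset := PySem.Set.ofList positions
  let final : Int × Int :=
    (start.1 + counts.getD '>' 0 - counts.getD '<' 0,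
     start.2 + counts.getD 'v' 0 - counts.getD '^' 0)
  pvBLoop posset permutation.toList.reverse final && (final == end_)

-- ===== PRECONDITION & SPEC =====
def Spec_is_valid_permutation (permutation : String) (positions : List (Int × Int)) (start : Int × Int) (end_ : Int × Int) (out : Bool) : Prop := out = is_valid_permutation_alt permutation positions start end_
instance (permutation : String) (positions : List (Int × Int)) (start : Int × Int) (end_ : Int × Int) (out : Bool) : Decidable (Spec_is_valid_permutation permutation positions start end_ out) := by unfold Spec_is_valid_permutation; infer_instance

-- ===== CLAIM =====
def Claim_equal_is_valid_permutation : Prop := ∀ (permutation : String) (positions : List (Int × Int)) (start : Int × Int) (end_ : Int × Int), Dom_is_valid_permutation permutation positions start end_ → Spec_is_valid_permutation permutation positions start end_ (is_valid_permutation permutation positions start end_)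

-- ===== LEMMAS AND PROOFS =====

-- forward step through the delta dict (proof-side helper)
def pvStep (p : Int × Int) (move : Char) : Int × Int :=
  let d := PySem.Dict.getD pvDeltas move (0, 0)
  (p.1 + d.1, p.2 + d.2)

-- forward check of all post-move positions (proof-side helper)
def pvFwd (positions : List (Int × Int)) (moves : List Char) (s : Int × Int) : Bool :=
  match moves with
  | [] => true
  | m :: rest =>
    let s' := pvStep s m
    positions.contains s' && pvFwd positions rest s'

-- A's if/elif chain computes the same step as the delta lookup.
theorem pvStep_eq (xy : Int × Int) (move : Char) :
    (if move == '>' then (xy.1 + 1, xy.2)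
      else if move == 'v' then (xy.1, xy.2 + 1)
      else if move == '<' then (xy.1 - 1, xy.2)
      else if move == '^' then (xy.1, xy.2 - 1)
      else xy) = pvStep xy move := by
  by_cases h1 : move = '>'
  · subst h1; simp [pvStep, pvDeltas, PySem.Dict.getD_eq_get?_getD, PySem.Dict.get?_mk_cons]
  by_cases h2 : move = 'v'
  · subst h2; simp [pvStep, pvDeltas, PySem.Dict.getD_eq_get?_getD, PySem.Dict.get?_mk_cons]
  by_cases h3 : move = '<'
  · subst h3
    simp [pvStep, pvDeltas, PySem.Dict.getD_eq_get?_getD, PySem.Dict.get?_mk_cons]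
    omega
  by_cases h4 : move = '^'
  · subst h4
    simp [pvStep, pvDeltas, PySem.Dict.getD_eq_get?_getD, PySem.Dict.get?_mk_cons]
    omega
  have g1 : ('>' == move) = false := beq_eq_false_iff_ne.mpr (Ne.symm h1)
  have g2 : ('v' == move) = false := beq_eq_false_iff_ne.mpr (Ne.symm h2)
  have g3 : ('<' == move) = false := beq_eq_false_iff_ne.mpr (Ne.symm h3)
  have g4 : ('^' == move) = false := beq_eq_false_iff_ne.mpr (Ne.symm h4)
  simp [pvStep, pvDeltas, PySem.Dict.getD_eq_get?_getD,
    PySem.Dict.get?, g1, g2, g3, g4, h1, h2, h3, h4]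

-- A's loop factored as: forward membership check AND endpoint comparison.
theorem pvALoop_eq_fwd (moves : List Char) (positions : List (Int × Int)) (s end_ : Int × Int) :
    pvALoop moves positions s end_ =
      (pvFwd positions moves s && (moves.foldl pvStep s == end_)) := by
  induction moves generalizing s with
  | nil => simp [pvALoop, pvFwd]
  | cons m rest ih =>
    rw [pvALoop]
    simp only [pvStep_eq]
    rw [pvFwd, List.foldl_cons]
    by_cases h : positions.contains (pvStep s m)
    · rw [if_pos h, ih, h]; simp
    · rw [if_neg h]
      simp only [Bool.not_eq_true] at h
      rw [h]; simp

-- undoing a step recovers the previous point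
theorem pvUndo_pvStep (p : Int × Int) (m : Char) :
    ((pvStep p m).1 - (PySem.Dict.getD pvDeltas m (0, 0)).1,
     (pvStep p m).2 - (PySem.Dict.getD pvDeltas m (0, 0)).2) = p := by
  simp [pvStep]

-- set membership over ofList is list membership
theorem pvContains_ofList (xs : List (Int × Int)) (y : Int × Int) :
    PySem.Set.contains (PySem.Set.ofList xs) y = xs.contains y := by
  simp [PySem.Set.contains, PySem.Set.mem_ofList]

theorem pvFwd_append (positions : List (Int × Int)) (ms : List Char) (m : Char) (s : Int × Int) :
    pvFwd positions (ms ++ [m]) s =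
      (pvFwd positions ms s && positions.contains (pvStep (ms.foldl pvStep s) m)) := by
  induction ms generalizing s with
  | nil => simp [pvFwd]
  | cons a t ih =>
    simp only [List.cons_append, pvFwd, List.foldl_cons, ih]
    rw [Bool.and_assoc]

-- the backward walk from the endpoint equals the forward check
theorem pvBLoop_eq_fwd (positions : List (Int × Int)) (moves : List Char) (s : Int × Int) :
    pvBLoop (PySem.Set.ofList positions) moves.reverse (moves.foldl pvStep s) =
      pvFwd positions moves s := by
  induction moves using List.reverseRecOn generalizing s with
  | nil => simp [pvBLoop, pvFwd]
  | append_singleton ms m ih =>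
    rw [List.reverse_append, List.reverse_singleton, List.singleton_append,
      List.foldl_append, List.foldl_cons, List.foldl_nil, pvBLoop, pvContains_ofList,
      pvFwd_append]
    by_cases h : positions.contains (pvStep (ms.foldl pvStep s) m)
    · rw [if_pos h, h, Bool.and_true]
      have hu := pvUndo_pvStep (ms.foldl pvStep s) m
      simp only [hu]
      exact ih s
    · have h' : pvStep (ms.foldl pvStep s) m ∉ positions := by simpa using h
      simp [h']

-- the endpoint in closed form from character counts
theorem pvFoldl_step_counts (moves : List Char) (s : Int × Int) :
    moves.foldl pvStep s =
      (s.1 + (moves.count '>' : Int) - (moves.count '<' : Int),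
       s.2 + (moves.count 'v' : Int) - (moves.count '^' : Int)) := by
  induction moves generalizing s with
  | nil => simp
  | cons m rest ih =>
    rw [List.foldl_cons, ih]
    have hc : ∀ c : Char, (m :: rest).count c = rest.count c + (if m == c then 1 else 0) := by
      intro c; rw [List.count_cons]
    by_cases h1 : m = '>'
    · subst h1
      simp [pvStep, pvDeltas, PySem.Dict.getD_eq_get?_getD, PySem.Dict.get?_mk_cons, hc]
      omega
    by_cases h2 : m = 'v'
    · subst h2
      simp [pvStep, pvDeltas, PySem.Dict.getD_eq_get?_getD, PySem.Dict.get?_mk_cons, hc]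
      omega
    by_cases h3 : m = '<'
    · subst h3
      simp [pvStep, pvDeltas, PySem.Dict.getD_eq_get?_getD, PySem.Dict.get?_mk_cons, hc]
      omega
    by_cases h4 : m = '^'
    · subst h4
      simp [pvStep, pvDeltas, PySem.Dict.getD_eq_get?_getD, PySem.Dict.get?_mk_cons, hc]
      omega
    · have g1 : ('>' == m) = false := beq_eq_false_iff_ne.mpr (Ne.symm h1)
      have g2 : ('v' == m) = false := beq_eq_false_iff_ne.mpr (Ne.symm h2)
      have g3 : ('<' == m) = false := beq_eq_false_iff_ne.mpr (Ne.symm h3)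
      have g4 : ('^' == m) = false := beq_eq_false_iff_ne.mpr (Ne.symm h4)
      simp [pvStep, pvDeltas, PySem.Dict.getD_eq_get?_getD,
        PySem.Dict.get?, g1, g2, g3, g4, h1, h2, h3, h4, hc]

-- ===== VERDICT =====
theorem is_valid_permutation_spec : Claim_equal_is_valid_permutation := by
  intro permutation positions start end_ _
  unfold Spec_is_valid_permutation is_valid_permutation is_valid_permutation_alt
  rw [pvALoop_eq_fwd]
  simp only [PySem.Dict.getD_counter]
  rw [← pvFoldl_step_counts permutation.toList start, pvBLoop_eq_fwd]
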